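-- pv_equiv track=rewrite | github.com/yedamPractice/CodingTestStudy | Programmers/Lv0/oz/study_0223.py | solution
-- ===== SOURCE A (Python) =====
-- def solution(spell, dic):
--     answer = 0
--     arr=[]
--     for i in range(len(dic)):
--         count=0
--         for j in spell:
--             if j in dic[i]:
--                 count+=1
--             arr.insert(i,count)
--     if len(spell) in arr:
--         answer = 1
--     else:
--         answer = 2
--     return answer
-- ===== SOURCE B (Python) =====
-- def solution(spell, dic):
--     # idiomatic: one subset-style test per word via any/all, no index bookkeeping
--     return 1 if any(all(s in word for s in spell) for word in dic) else 2
-- ===== Notes on version B (the rewrite author's own statement) =====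
-- stated objective: idiomatic
-- what changed: A maintains a running per-prefix match counter and inserts every partial count into an auxiliary list arr, then tests len(spell) membership; B drops arr and the counting entirely and returns 1 on the first word for which every spell string occurs in it (any/all subset test).
-- outside the precondition, e.g. on solution([], ['ab']): A returns 2, B returns 1
import Mathlib
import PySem

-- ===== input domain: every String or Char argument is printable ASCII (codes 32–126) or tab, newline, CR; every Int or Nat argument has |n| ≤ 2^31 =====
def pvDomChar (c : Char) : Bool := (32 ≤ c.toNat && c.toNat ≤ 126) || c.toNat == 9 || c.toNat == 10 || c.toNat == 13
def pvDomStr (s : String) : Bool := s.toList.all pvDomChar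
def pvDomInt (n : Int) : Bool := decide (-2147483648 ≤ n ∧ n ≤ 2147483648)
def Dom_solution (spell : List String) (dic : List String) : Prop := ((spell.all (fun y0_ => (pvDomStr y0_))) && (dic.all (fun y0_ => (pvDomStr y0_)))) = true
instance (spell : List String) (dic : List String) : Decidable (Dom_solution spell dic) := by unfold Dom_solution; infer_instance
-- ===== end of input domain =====

-- B replaces A's partial-count bookkeeping list with a direct any/all subset test per word (idiomatic, same cost).


-- ===== PORT A =====
-- 'for i in range(len(dic)): … dic[i] …' ported as a fold over enumerate(dic) (exact: i runs 0..len-1, dic[i] is the element)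
def solution (spell : List String) (dic : List String) : Int :=
  let arr : List Int :=
    (PySem.List.enumerate dic).foldl
      (fun arr iw =>
        (spell.foldl
          (fun (st : Int × List Int) j =>
            let count := if PySem.Str.isIn j iw.2 then st.1 + 1 else st.1
            (count, PySem.List.insert st.2 iw.1 count))
          (0, arr)).2)
      []
  if (spell.length : Int) ∈ arr then 1 else 2

-- ===== PORT B =====
def solution_alt (spell : List String) (dic : List String) : Int :=
  if dic.any (fun w => spell.all (fun j => PySem.Str.isIn j w)) then 1 else 2

-- ===== PRECONDITION & SPEC =====
-- Pre_ excludes the empty spell, an unspecified corner on which A's arr stays empty (A returns 2) while the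
-- vacuously true subset test makes B return 1 on a nonempty dic — both values are defensible there.
def Pre_solution (spell : List String) (dic : List String) : Prop := spell ≠ []
instance (spell : List String) (dic : List String) : Decidable (Pre_solution spell dic) := by unfold Pre_solution; infer_instance
def pvWitness_solution : List String × List String := (["a"], ["ab"])
def Spec_solution (spell : List String) (dic : List String) (out : Int) : Prop := out = solution_alt spell dic
instance (spell : List String) (dic : List String) (out : Int) : Decidable (Spec_solution spell dic out) := by unfold Spec_solution; infer_instance

-- ===== CLAIM (what is proved, stated in full; the proofs are below) =====
def Claim_equal_solution : Prop := ∀ (spell : List String) (dic : List String), Dom_solution spell dic → Pre_solution spell dic → Spec_solution spell dic (solution spell dic)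

-- ===== LEMMAS AND PROOFS =====

theorem mem_pyinsert (xs : List Int) (i : Int) (v n : Int) :
    n ∈ PySem.List.insert xs i v ↔ n = v ∨ n ∈ xs := by
  simp only [PySem.List.insert, List.mem_append, List.mem_cons]
  have ht := List.take_append_drop ((PySem.List.sliceIndices xs.length (some i) none 1).1.toNat) xs
  conv_rhs => rw [← ht]
  simp only [List.mem_append]
  tauto

-- membership in arr after A's inner loop over spell: the old elements plus every nonempty-prefix partial count
theorem inner_mem (s : List String) (w : String) (i : Int) (c : Int) (a : List Int) (n : Int) :
    (n ∈ (s.foldl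
        (fun (st : Int × List Int) j =>
          let count := if PySem.Str.isIn j w then st.1 + 1 else st.1
          (count, PySem.List.insert st.2 i count))
        (c, a)).2)
    ↔ n ∈ a ∨ ∃ p q, s = p ++ q ∧ p ≠ [] ∧ n = c + (p.countP (fun j => PySem.Str.isIn j w) : Int) := by
  induction s generalizing c a with
  | nil =>
    simp only [List.foldl_nil]
    constructor
    · exact fun h => Or.inl h
    · rintro (h | ⟨p, q, hpq, hne, _⟩)
      · exact h
      · exact absurd (List.append_eq_nil_iff.mp hpq.symm).1 hne
  | cons j s' ih =>
    simp only [List.foldl_cons]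
    rw [ih]
    rw [mem_pyinsert]
    constructor
    · rintro (⟨h | h⟩ | ⟨p, q, hpq, hne, hn⟩)
      · exact Or.inr ⟨[j], s', rfl, by simp, by simp [List.countP_cons]; split_ifs <;> simp_all⟩
      · exact Or.inl h
      · refine Or.inr ⟨j :: p, q, by rw [hpq]; rfl, by simp, ?_⟩
        simp only [List.countP_cons] at *
        split_ifs at hn ⊢ <;> push_cast at hn ⊢ <;> omega
    · rintro (h | ⟨p, q, hpq, hne, hn⟩)
      · exact Or.inl (Or.inr h)
      · match p, hne with
        | j' :: p', _ =>
          rw [List.cons_append] at hpq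
          obtain ⟨hj, hs'⟩ := List.cons.inj hpq
          subst hj
          by_cases hp' : p' = []
          · subst hp'
            refine Or.inl (Or.inl ?_)
            simp only [List.countP_cons, List.countP_nil] at hn
            split_ifs at hn ⊢ <;> push_cast at hn <;> omega
          · refine Or.inr ⟨p', q, hs', hp', ?_⟩
            simp only [List.countP_cons] at hn
            split_ifs at hn ⊢ <;> push_cast at hn ⊢ <;> omega

-- membership in arr after A's outer loop over the (index, word) pairs
theorem outer_mem (s : List String) (l : List (Int × String)) (a : List Int) (n : Int) :
    (n ∈ l.foldl
        (fun arr iw =>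
          (s.foldl
            (fun (st : Int × List Int) j =>
              let count := if PySem.Str.isIn j iw.2 then st.1 + 1 else st.1
              (count, PySem.List.insert st.2 iw.1 count))
            (0, arr)).2)
        a)
    ↔ n ∈ a ∨ ∃ iw ∈ l, ∃ p q, s = p ++ q ∧ p ≠ [] ∧ n = (p.countP (fun j => PySem.Str.isIn j iw.2) : Int) := by
  induction l generalizing a with
  | nil => simp
  | cons iw l' ih =>
    simp only [List.foldl_cons]
    rw [ih]
    rw [inner_mem]
    simp only [List.mem_cons, zero_add]
    constructor
    · rintro (⟨h | h⟩ | ⟨x, hx, hrest⟩)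
      · exact Or.inl h
      · exact Or.inr ⟨iw, Or.inl rfl, h⟩
      · exact Or.inr ⟨x, Or.inr hx, hrest⟩
    · rintro (h | ⟨x, hx | hx, hrest⟩)
      · exact Or.inl (Or.inl h)
      · exact Or.inl (Or.inr (hx ▸ hrest))
      · exact Or.inr ⟨x, hx, hrest⟩

-- the full count len(spell) is hit exactly when every spell string occurs in the word
theorem full_count (s : List String) (w : String) (hs : s ≠ []) :
    ((∃ p q, s = p ++ q ∧ p ≠ [] ∧ (s.length : Int) = (p.countP (fun j => PySem.Str.isIn j w) : Int))
      ↔ ∀ j ∈ s, PySem.Str.isIn j w = true) := by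
  constructor
  · rintro ⟨p, q, hpq, hne, hlen⟩
    have hc : s.length = p.countP (fun j => PySem.Str.isIn j w) := by exact_mod_cast hlen
    have h1 : p.countP (fun j => PySem.Str.isIn j w) ≤ p.length := List.countP_le_length
    have h2 : s.length = p.length + q.length := by rw [hpq]; simp
    have hq : q = [] := List.eq_nil_of_length_eq_zero (by omega)
    have hp : p = s := by rw [hpq, hq, List.append_nil]
    subst hp
    have : p.countP (fun j => PySem.Str.isIn j w) = p.length := by omega
    exact fun j hj => List.countP_eq_length.mp this j hj
  · intro hall
    refine ⟨s, [], by simp, hs, ?_⟩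
    have : s.countP (fun j => PySem.Str.isIn j w) = s.length := List.countP_eq_length.mpr hall
    exact_mod_cast this.symm

-- ===== VERDICT (by name: the statement is the Claim_ definition above) =====
theorem solution_spec : Claim_equal_solution := by
  intro spell dic _ hpre
  unfold Spec_solution solution solution_alt
  have hmem := outer_mem spell (PySem.List.enumerate dic) [] (spell.length : Int)
  simp only [List.not_mem_nil, false_or] at hmem
  have hiff : ((spell.length : Int) ∈
      (PySem.List.enumerate dic).foldl
        (fun arr iw =>
          (spell.foldl
            (fun (st : Int × List Int) j =>
              let count := if PySem.Str.isIn j iw.2 then st.1 + 1 else st.1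
              (count, PySem.List.insert st.2 iw.1 count))
            (0, arr)).2)
        [])
      ↔ dic.any (fun w => spell.all (fun j => PySem.Str.isIn j w)) = true := by
    rw [hmem]
    rw [List.any_eq_true]
    constructor
    · rintro ⟨iw, hiw, hrest⟩
      refine ⟨iw.2, ?_, ?_⟩
      · have : iw.2 ∈ (PySem.List.enumerate dic).map (·.2) := List.mem_map.mpr ⟨iw, hiw, rfl⟩
        rwa [PySem.List.map_snd_enumerate] at this
      · exact List.all_eq_true.mpr ((full_count spell iw.2 hpre).mp hrest)
    · rintro ⟨w, hw, hall⟩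
      have hw' : w ∈ (PySem.List.enumerate dic).map (·.2) := by
        rw [PySem.List.map_snd_enumerate]; exact hw
      obtain ⟨iw, hiw, hsnd⟩ := List.mem_map.mp hw'
      exact ⟨iw, hiw, (full_count spell iw.2 hpre).mpr (hsnd ▸ List.all_eq_true.mp hall)⟩
  by_cases h : dic.any (fun w => spell.all (fun j => PySem.Str.isIn j w)) = true
  · rw [if_pos (hiff.mpr h), if_pos h]
  · rw [if_neg (fun hc => h (hiff.mp hc)), if_neg h]
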